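-- pv_equiv track=rewrite | github.com/Badheil/- | контейнеры.py | find
-- ===== SOURCE A (Python) =====
-- def find(x):
--     a = ''.join(str(i).lower() for i in x)
--     index = 0
--     for i in range(len(a)):
--         if a[i].isalpha():
--             index = i
--     strr = a[index:len(a)] + a[0:index]
--     return strr
-- ===== SOURCE B (Python) =====
-- def find(x):
--     a = ''.join(str(i).lower() for i in x)
--     before = ''
--     cur = ''
--     for c in a:
--         if c.isalpha():
--             before += cur
--             cur = c
--         else:
--             cur += c
--     return cur + before
-- ===== Notes on version B (the rewrite author's own statement) =====
-- stated objective: alternative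
-- what changed: B never computes an index or slices: a single pass maintains the two rotation pieces directly (on each alphabetic char the suffix accumulator is flushed into the prefix accumulator and restarted), and returns suffix+prefix.
import Mathlib
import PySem

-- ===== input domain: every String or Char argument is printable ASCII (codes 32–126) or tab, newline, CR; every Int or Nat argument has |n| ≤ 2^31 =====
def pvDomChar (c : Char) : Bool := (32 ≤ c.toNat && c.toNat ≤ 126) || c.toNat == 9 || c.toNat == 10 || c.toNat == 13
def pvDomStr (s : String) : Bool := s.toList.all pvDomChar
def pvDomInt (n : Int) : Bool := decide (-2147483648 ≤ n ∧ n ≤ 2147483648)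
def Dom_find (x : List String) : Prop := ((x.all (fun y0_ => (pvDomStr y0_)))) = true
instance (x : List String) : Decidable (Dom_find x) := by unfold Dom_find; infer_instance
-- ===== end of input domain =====

-- B computes no index and takes no slice: one pass carries the two rotation pieces themselves,
-- flushing the suffix accumulator into the prefix on every alphabetic character; same value.

-- ===== PORT A =====
-- A's 'for i in range(len(a)): if a[i].isalpha(): index = i' loop, as a fold over the range
def aFold (a : List Char) : Int :=
  (PySem.List.pyRange 0 (a.length : Int) 1).foldl
      (fun idx i => match PySem.List.pyGet? a i with
        | some c => if PySem.Chars.isalpha c then i else idx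
        | none => idx) 0

def find (x : List String) : String :=
  let a : List Char := PySem.Chars.join [] (x.map (fun s => PySem.Chars.lower s.toList))
  let index : Int := aFold a
  String.ofList (PySem.List.slice a (some index) (some (a.length : Int)) ++
                 PySem.List.slice a (some 0) (some index))

-- ===== PORT B =====
-- B's loop body: accumulators (before, cur); an alphabetic char flushes cur into before
def bStep (st : List Char × List Char) (c : Char) : List Char × List Char :=
  if PySem.Chars.isalpha c then (st.1 ++ st.2, [c]) else (st.1, st.2 ++ [c])

def find_alt (x : List String) : String :=
  let a : List Char := PySem.Chars.join [] (x.map (fun s => PySem.Chars.lower s.toList))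
  let st := a.foldl bStep ([], [])
  String.ofList (st.2 ++ st.1)

-- ===== PRECONDITION & SPEC =====
def Spec_find (x : List String) (out : String) : Prop := out = find_alt x
instance (x : List String) (out : String) : Decidable (Spec_find x out) := by unfold Spec_find; infer_instance

-- ===== CLAIM (what is proved, stated in full; the proofs are below) =====
def Claim_equal_find : Prop := ∀ (x : List String), Dom_find x → Spec_find x (find x)

-- ===== LEMMAS AND PROOFS =====

-- the last alphabetic index (default 0), forward
def lastIdx : List Char → Nat → Nat → Nat
  | [], _, acc => acc
  | c :: t, pos, acc => lastIdx t (pos + 1) (if PySem.Chars.isalpha c then pos else acc)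

lemma lastIdx_append (c : Char) :
    ∀ (t : List Char) (pos acc : Nat), lastIdx (t ++ [c]) pos acc
      = if PySem.Chars.isalpha c then pos + t.length else lastIdx t pos acc := by
  intro t
  induction t with
  | nil => intro pos acc; by_cases h : PySem.Chars.isalpha c <;> simp [lastIdx, h]
  | cons d t ih =>
    intro pos acc
    simp only [List.cons_append, lastIdx, ih]
    by_cases h : PySem.Chars.isalpha c <;> simp [h, List.length_cons] <;> omega

lemma lastIdx_le (a : List Char) : lastIdx a 0 0 ≤ a.length := by
  induction a using List.reverseRecOn with
  | nil => simp [lastIdx]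
  | append_singleton t c ih =>
    rw [lastIdx_append]
    split <;> simp <;> omega

lemma aFold_eq (a : List Char) : aFold a = (lastIdx a 0 0 : Int) := by
  induction a using List.reverseRecOn with
  | nil => rfl
  | append_singleton t c ih =>
    have hn : (0:Int) ≤ (t.length : Int) := by positivity
    unfold aFold
    have hr : PySem.List.pyRange 0 ((t ++ [c]).length : Int) 1
        = PySem.List.pyRange 0 (t.length : Int) 1 ++ [(t.length : Int)] := by
      simp only [List.length_append, List.length_cons, List.length_nil]
      push_cast
      exact PySem.List.pyRange_one_succ_right hn
    rw [hr, List.foldl_append]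
    have hcong : (PySem.List.pyRange 0 (t.length : Int) 1).foldl
        (fun idx i => match PySem.List.pyGet? (t ++ [c]) i with
          | some c => if PySem.Chars.isalpha c then i else idx
          | none => idx) 0
        = (PySem.List.pyRange 0 (t.length : Int) 1).foldl
        (fun idx i => match PySem.List.pyGet? t i with
          | some c => if PySem.Chars.isalpha c then i else idx
          | none => idx) 0 := by
      apply PySem.List.foldl_congr_mem
      intro acc i hi
      rw [PySem.List.mem_pyRange_one] at hi
      have : PySem.List.pyGet? (t ++ [c]) i = PySem.List.pyGet? t i := by
        have h0 : i = ((i.toNat : Nat) : Int) := by omega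
        rw [h0, PySem.List.pyGet?_natCast, PySem.List.pyGet?_natCast,
          List.getElem?_append_left (by omega : i.toNat < t.length)]
      rw [this]
    rw [hcong]
    have hlast : PySem.List.pyGet? (t ++ [c]) ((t.length : Nat) : Int) = some c :=
      PySem.List.pyGet?_append_length t [] c
    rw [List.foldl_cons, List.foldl_nil, hlast, lastIdx_append]
    by_cases hc : PySem.Chars.isalpha c
    · simp [hc]
    · simp [hc, ← ih, aFold]

lemma bFold_eq (a : List Char) :
    a.foldl bStep ([], []) = (a.take (lastIdx a 0 0), a.drop (lastIdx a 0 0)) := by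
  induction a using List.reverseRecOn with
  | nil => rfl
  | append_singleton t c ih =>
    rw [List.foldl_append, ih, List.foldl_cons, List.foldl_nil, lastIdx_append]
    have hle := lastIdx_le t
    simp only [bStep]
    by_cases hc : PySem.Chars.isalpha c
    · rw [if_pos hc, if_pos hc, Nat.zero_add]
      refine Prod.ext ?_ ?_
      · rw [List.take_append_drop, List.take_append_of_le_length (le_refl _), List.take_length]
      · rw [List.drop_append_of_le_length (le_refl _), List.drop_length, List.nil_append]
    · rw [if_neg hc, if_neg hc,
        List.take_append_of_le_length hle, List.drop_append_of_le_length hle]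

lemma find_eq_alt (x : List String) : find x = find_alt x := by
  unfold find find_alt
  dsimp only
  set a : List Char := PySem.Chars.join [] (x.map (fun s => PySem.Chars.lower s.toList)) with ha
  rw [aFold_eq, bFold_eq]
  set k : Nat := lastIdx a 0 0 with hk
  have hkle : k ≤ a.length := lastIdx_le a
  apply congrArg String.ofList
  apply congrArg₂ (· ++ ·)
  · show PySem.List.slice a (some (k : Int)) (some (a.length : Int)) = a.drop k
    rw [PySem.List.slice_natCast]
    exact List.take_of_length_le (by simp)
  · show PySem.List.slice a (some 0) (some (k : Int)) = a.take k
    rw [PySem.List.slice_zero_start, PySem.List.slice_to_natCast]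

-- ===== VERDICT (by name: the statement is the Claim_ definition above) =====
theorem find_spec : Claim_equal_find := by
  intro x _
  unfold Spec_find
  exact find_eq_alt x
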